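-- pv_equiv track=rewrite | github.com/kal-purush/Argus | logic.py | _expand_unicode_properties
-- ===== SOURCE A (Python) =====
-- def _expand_unicode_properties(pattern):
--     """
--     Convert Unicode property escapes like \p{L} to character classes.
--     The regex module supports these, but sre_parse doesn't.
--     """
--     import re as re_std
--
--     # Common Unicode property mappings (simplified)
--     unicode_props = {
--         r'\p{L}': r'[a-zA-Z\u00C0-\u024F\u1E00-\u1EFF]',  # Letters (Latin extended)
--         r'\p{Ll}': r'[a-z\u00E0-\u00FF]',  # Lowercase letters
--         r'\p{Lu}': r'[A-Z\u00C0-\u00DE]',  # Uppercase letters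
--         r'\p{N}': r'[0-9]',  # Numbers (simplified to ASCII digits)
--         r'\p{Nd}': r'[0-9]',  # Decimal numbers
--         r'\p{P}': r'[!-/:-@\[-`{-~]',  # Punctuation
--         r'\p{S}': r'[$+<->\^`|~]',  # Symbols
--         r'\p{Z}': r'[ \t\n\r]',  # Separators (whitespace)
--         r'\p{Zs}': r'[ ]',  # Space separator
--     }
--
--     # Also handle negated properties \P{...}
--     negated_props = {
--         r'\P{L}': r'[^a-zA-Z\u00C0-\u024F\u1E00-\u1EFF]',
--         r'\P{N}': r'[^0-9]',
--         r'\P{Nd}': r'[^0-9]',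
--     }
--
--     result = pattern
--
--     # Replace Unicode properties
--     for prop, replacement in unicode_props.items():
--         result = result.replace(prop, replacement)
--
--     for prop, replacement in negated_props.items():
--         result = result.replace(prop, replacement)
--
--     return result
-- ===== SOURCE B (Python) =====
-- def _expand_unicode_properties(pattern):
--     """
--     Convert Unicode property escapes like \p{L} to character classes.
--     Single left-to-right table-driven pass instead of 12 full-string scans.
--     """
--     table = [
--         (r'\p{L}', r'[a-zA-Z\u00C0-\u024F\u1E00-\u1EFF]'),
--         (r'\p{Ll}', r'[a-z\u00E0-\u00FF]'),
--         (r'\p{Lu}', r'[A-Z\u00C0-\u00DE]'),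
--         (r'\p{N}', r'[0-9]'),
--         (r'\p{Nd}', r'[0-9]'),
--         (r'\p{P}', r'[!-/:-@\[-`{-~]'),
--         (r'\p{S}', r'[$+<->\^`|~]'),
--         (r'\p{Z}', r'[ \t\n\r]'),
--         (r'\p{Zs}', r'[ ]'),
--         (r'\P{L}', r'[^a-zA-Z\u00C0-\u024F\u1E00-\u1EFF]'),
--         (r'\P{N}', r'[^0-9]'),
--         (r'\P{Nd}', r'[^0-9]'),
--     ]
--     out = []
--     i = 0
--     n = len(pattern)
--     while i < n:
--         for key, rep in table:
--             if pattern.startswith(key, i):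
--                 out.append(rep)
--                 i += len(key)
--                 break
--         else:
--             out.append(pattern[i])
--             i += 1
--     return ''.join(out)
-- ===== Notes on version B (the rewrite author's own statement) =====
-- stated objective: alternative
-- what changed: Replaced twelve sequential full-string str.replace passes (one per dict entry) by a single left-to-right table-driven scan that at each position tries the merged key table once and emits either a replacement or the current character.
import Mathlib
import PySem

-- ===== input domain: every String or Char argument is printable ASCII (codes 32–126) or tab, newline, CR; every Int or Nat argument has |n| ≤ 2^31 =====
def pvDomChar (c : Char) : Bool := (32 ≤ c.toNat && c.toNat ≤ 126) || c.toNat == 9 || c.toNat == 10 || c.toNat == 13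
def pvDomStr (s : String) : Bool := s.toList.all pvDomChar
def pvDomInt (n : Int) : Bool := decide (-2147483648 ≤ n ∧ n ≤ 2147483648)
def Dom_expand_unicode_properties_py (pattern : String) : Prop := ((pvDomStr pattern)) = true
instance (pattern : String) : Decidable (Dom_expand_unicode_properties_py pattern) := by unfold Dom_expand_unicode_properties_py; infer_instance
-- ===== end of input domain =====

-- B replaces A's twelve sequential full-string str.replace passes by one left-to-right
-- table-driven scan (objective: alternative; same results, proved below).

-- ===== PORT A =====
-- the two dict literals of A, as association lists in insertion order
def pvUnicodeProps : List (String × String) :=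
  [("\\p{L}",  "[a-zA-Z\\u00C0-\\u024F\\u1E00-\\u1EFF]"),
   ("\\p{Ll}", "[a-z\\u00E0-\\u00FF]"),
   ("\\p{Lu}", "[A-Z\\u00C0-\\u00DE]"),
   ("\\p{N}",  "[0-9]"),
   ("\\p{Nd}", "[0-9]"),
   ("\\p{P}",  "[!-/:-@\\[-`{-~]"),
   ("\\p{S}",  "[$+<->\\^`|~]"),
   ("\\p{Z}",  "[ \\t\\n\\r]"),
   ("\\p{Zs}", "[ ]")]

def pvNegatedProps : List (String × String) :=
  [("\\P{L}",  "[^a-zA-Z\\u00C0-\\u024F\\u1E00-\\u1EFF]"),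
   ("\\P{N}",  "[^0-9]"),
   ("\\P{Nd}", "[^0-9]")]

def expand_unicode_properties_py (pattern : String) : String :=
  -- result = pattern; two for-loops of result = result.replace(prop, replacement)
  let result := pattern
  let result := pvUnicodeProps.foldl (fun r p => PySem.Str.replace r p.1 p.2) result
  let result := pvNegatedProps.foldl (fun r p => PySem.Str.replace r p.1 p.2) result
  result

-- ===== PORT B =====
-- Source B's merged table, in the same order
def pvTableB : List (String × String) :=
  [("\\p{L}",  "[a-zA-Z\\u00C0-\\u024F\\u1E00-\\u1EFF]"),
   ("\\p{Ll}", "[a-z\\u00E0-\\u00FF]"),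
   ("\\p{Lu}", "[A-Z\\u00C0-\\u00DE]"),
   ("\\p{N}",  "[0-9]"),
   ("\\p{Nd}", "[0-9]"),
   ("\\p{P}",  "[!-/:-@\\[-`{-~]"),
   ("\\p{S}",  "[$+<->\\^`|~]"),
   ("\\p{Z}",  "[ \\t\\n\\r]"),
   ("\\p{Zs}", "[ ]"),
   ("\\P{L}",  "[^a-zA-Z\\u00C0-\\u024F\\u1E00-\\u1EFF]"),
   ("\\P{N}",  "[^0-9]"),
   ("\\P{Nd}", "[^0-9]")]

def pvTableC : List (List Char × List Char) := pvTableB.map (fun p => (p.1.toList, p.2.toList))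

-- the while-loop of Source B: at each position try the table keys in order
-- (pattern.startswith(key, i)); on a hit emit the replacement and skip the key
-- (the matched head char plus key.length - 1 more), else emit the char
def pvScan (s : List Char) : List Char :=
  match s with
  | [] => []
  | c :: t =>
    match pvTableC.find? (fun p => p.1.isPrefixOf (c :: t)) with
    | some (k, r) => r ++ pvScan (List.drop (k.length - 1) t)
    | none => c :: pvScan t
termination_by s.length
decreasing_by all_goals (simp; try omega)

def expand_unicode_properties_py_alt (pattern : String) : String :=
  String.ofList (pvScan pattern.toList)

-- ===== PRECONDITION & SPEC =====
def Spec_expand_unicode_properties_py (pattern : String) (out : String) : Prop := out = expand_unicode_properties_py_alt pattern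
instance (pattern : String) (out : String) : Decidable (Spec_expand_unicode_properties_py pattern out) := by unfold Spec_expand_unicode_properties_py; infer_instance

-- ===== CLAIM (what is proved, stated in full; the proofs are below) =====
def Claim_equal_expand_unicode_properties_py : Prop := ∀ (pattern : String), Dom_expand_unicode_properties_py pattern → Spec_expand_unicode_properties_py pattern (expand_unicode_properties_py pattern)

-- ===== LEMMAS AND PROOFS =====

-- single-key left-to-right global replace, structurally (what one str.replace pass does)
def pvRep (k r : List Char) (s : List Char) : List Char :=
  match s with
  | [] => []
  | c :: t => if k.isPrefixOf (c :: t) then r ++ pvRep k r (List.drop (k.length - 1) t) else c :: pvRep k r t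
termination_by s.length
decreasing_by all_goals (simp; try omega)

-- multi-key left-to-right scan over an arbitrary key table (pvScan = pvMulti pvTableC)
def pvMulti (ks : List (List Char × List Char)) (s : List Char) : List Char :=
  match s with
  | [] => []
  | c :: t =>
    match ks.find? (fun p => p.1.isPrefixOf (c :: t)) with
    | some (k, r) => r ++ pvMulti ks (List.drop (k.length - 1) t)
    | none => c :: pvMulti ks t
termination_by s.length
decreasing_by all_goals (simp; try omega)

theorem pvScan_eq_multi (s : List Char) : pvScan s = pvMulti pvTableC s := by
  induction s using pvScan.induct with
  | case1 => rw [pvScan, pvMulti]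
  | case2 c t k r h ih => rw [pvScan, pvMulti, h]; simp [ih]
  | case3 c t h ih => rw [pvScan, pvMulti, h]; simp [ih]

-- u is inert for a key '\'::c1::_ : u never puts '\' immediately before c1, and does not end in '\'
def pvKfree (c1 : Char) : List Char → Bool
  | [] => true
  | [a] => a != '\\'
  | a :: b :: u => (a != '\\' || b != c1) && pvKfree c1 (b :: u)

-- a replace pass for key '\'::c1::k2 walks through an inert block unchanged
theorem pvRep_append_of_kfree (c1 : Char) (k2 r : List Char) (u : List Char)
    (hu : pvKfree c1 u = true) (X : List Char) :
    pvRep ('\\' :: c1 :: k2) r (u ++ X) = u ++ pvRep ('\\' :: c1 :: k2) r X := by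
  induction u with
  | nil => simp
  | cons a u' ih =>
    cases u' with
    | nil =>
      have ha : a ≠ '\\' := by simpa [pvKfree] using hu
      rw [List.cons_append, List.nil_append, pvRep]
      simp only [List.isPrefixOf]
      simp
      intro h
      exact absurd h.symm ha
    | cons b u'' =>
      have h1 : ((a != '\\') || (b != c1)) = true ∧ pvKfree c1 (b :: u'') = true := by
        simpa [pvKfree, Bool.and_eq_true] using hu
      have hpre : ('\\' :: c1 :: k2).isPrefixOf (a :: (b :: u'' ++ X)) = false := by
        simp only [List.isPrefixOf]
        rcases Bool.or_eq_true_iff.mp h1.1 with h | h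
        · simp
          intro h'
          exact absurd h'.symm (bne_iff_ne.mp h)
        · simp
          intro _
          simp only [List.isPrefixOf]
          simp
          intro h'
          exact absurd h'.symm (bne_iff_ne.mp h)
      rw [List.cons_append, pvRep]
      simp only [hpre, Bool.false_eq_true, if_false]
      rw [ih h1.2]
      simp

-- a multi-key scan walks through a backslash-free block unchanged (all keys start with '\')
theorem pvMulti_append_of_no_bs (ks : List (List Char × List Char))
    (hks : ∀ p ∈ ks, ∃ w, p.1 = '\\' :: w) (u : List Char) (hu : '\\' ∉ u) (X : List Char) :
    pvMulti ks (u ++ X) = u ++ pvMulti ks X := by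
  induction u with
  | nil => simp
  | cons a u' ih =>
    have ha : a ≠ '\\' := fun h => hu (h ▸ List.mem_cons_self)
    have hu' : '\\' ∉ u' := fun h => hu (List.mem_cons_of_mem _ h)
    have hnone : ks.find? (fun p => p.1.isPrefixOf (a :: (u' ++ X))) = none := by
      apply List.find?_eq_none.mpr
      intro p hp
      obtain ⟨w, hw⟩ := hks p hp
      rw [hw]
      simp only [List.isPrefixOf]
      simp
      intro h
      exact absurd h.symm ha
    rw [List.cons_append, pvMulti, hnone]
    simp [ih hu']

-- a '\'-free, '['-free prefix of a scan's output was already a prefix of its input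
theorem pvMulti_prefix_reflect (ks : List (List Char × List Char))
    (hrs : ∀ p ∈ ks, ∃ v, p.2 = '[' :: v)
    (t : List Char) (w : List Char) (hw1 : '\\' ∉ w) (hw2 : '[' ∉ w)
    (h : w.isPrefixOf (pvMulti ks t) = true) : w.isPrefixOf t = true := by
  induction t generalizing w with
  | nil =>
    rw [pvMulti] at h
    cases w with
    | nil => simp [List.isPrefixOf]
    | cons a w' => simp [List.isPrefixOf] at h
  | cons c t' ih =>
    cases w with
    | nil => simp [List.isPrefixOf]
    | cons a w' =>
      have ha : a ≠ '[' := fun hh => hw2 (hh ▸ List.mem_cons_self)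
      rw [pvMulti] at h
      cases hf : ks.find? (fun p => p.1.isPrefixOf (c :: t')) with
      | some p =>
        rw [hf] at h
        obtain ⟨v, hv⟩ := hrs p (List.mem_of_find?_eq_some hf)
        rcases p with ⟨k, rr⟩
        simp only at h
        rw [show rr = '[' :: v from hv] at h
        simp only [List.cons_append, List.isPrefixOf] at h
        simp at h
        exact absurd h.1.symm (Ne.symm ha)
      | none =>
        rw [hf] at h
        simp only [List.isPrefixOf] at h ⊢
        simp at h ⊢
        exact ⟨h.1, List.isPrefixOf_iff_prefix.mp <| ih w' (fun hh => hw1 (List.mem_cons_of_mem _ hh))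
          (fun hh => hw2 (List.mem_cons_of_mem _ hh))
          (List.isPrefixOf_iff_prefix.mpr h.2)⟩

-- the crux: running one more replace pass after a multi-key scan = the scan with the key appended
theorem pvRep_multi (ks : List (List Char × List Char)) (c1 : Char) (k2 r : List Char)
    (hks : ∀ p ∈ ks, ∃ w, p.1 = '\\' :: w) (hrs : ∀ p ∈ ks, ∃ v, p.2 = '[' :: v)
    (hfree : ∀ p ∈ ks, pvKfree c1 p.2 = true)
    (hk2a : '\\' ∉ (c1 :: k2)) (hk2b : '[' ∉ (c1 :: k2)) :
    ∀ s, pvRep ('\\' :: c1 :: k2) r (pvMulti ks s) = pvMulti (ks ++ [('\\' :: c1 :: k2, r)]) s := by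
  suffices H : ∀ n (s : List Char), s.length ≤ n →
      pvRep ('\\' :: c1 :: k2) r (pvMulti ks s) = pvMulti (ks ++ [('\\' :: c1 :: k2, r)]) s from
    fun s => H s.length s le_rfl
  intro n
  induction n with
  | zero =>
    intro s hs
    have hnil : s = [] := List.eq_nil_of_length_eq_zero (Nat.le_zero.mp hs)
    subst hnil
    rw [pvMulti, pvMulti, pvRep]
  | succ n ihn =>
    intro s hs
    match s with
    | [] => rw [pvMulti, pvMulti, pvRep]
    | c :: t =>
      have hs' : t.length ≤ n := by simpa using hs
      cases hf : ks.find? (fun p => p.1.isPrefixOf (c :: t)) with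
      | some p =>
        rcases p with ⟨k', r'⟩
        have hmem := List.mem_of_find?_eq_some hf
        obtain ⟨v, hv⟩ := hrs _ hmem
        have hkf : pvKfree c1 r' = true := hfree _ hmem
        have hf2 : (ks ++ [('\\' :: c1 :: k2, r)]).find? (fun p => p.1.isPrefixOf (c :: t))
            = some (k', r') := by rw [List.find?_append, hf]; rfl
        rw [pvMulti, hf, pvMulti, hf2]
        simp only
        rw [pvRep_append_of_kfree c1 k2 r r' hkf]
        congr 1
        exact ihn _ (le_trans (by simp) hs')
      | none =>
        by_cases hp : ('\\' :: c1 :: k2).isPrefixOf (c :: t) = true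
        · have hp' := hp
          simp only [List.isPrefixOf, Bool.and_eq_true, beq_iff_eq] at hp'
          have hc : c = '\\' := hp'.1.symm
          have hpt : (c1 :: k2).isPrefixOf t = true := hp'.2
          obtain ⟨rest, hrest⟩ := List.isPrefixOf_iff_prefix.mp hpt
          have hf2 : (ks ++ [('\\' :: c1 :: k2, r)]).find? (fun p => p.1.isPrefixOf (c :: t))
              = some ('\\' :: c1 :: k2, r) := by
            rw [List.find?_append, hf]
            simp [List.find?, hp]
          rw [pvMulti, hf, pvMulti, hf2]
          simp only
          subst hc
          rw [← hrest, pvMulti_append_of_no_bs ks hks (c1 :: k2) hk2a rest]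
          have hlen : ('\\' :: c1 :: k2).length - 1 = (c1 :: k2).length := by simp
          rw [hlen, List.drop_left, pvRep]
          have hpre2 : ('\\' :: c1 :: k2).isPrefixOf
              ('\\' :: ((c1 :: k2) ++ pvMulti ks rest)) = true := by
            apply List.isPrefixOf_iff_prefix.mpr
            exact ⟨pvMulti ks rest, by simp⟩
          rw [if_pos hpre2, hlen, List.drop_left]
          congr 1
          exact ihn rest (by
            have hlen2 := congrArg List.length hrest
            simp at hlen2
            omega)
        · have hf2 : (ks ++ [('\\' :: c1 :: k2, r)]).find? (fun p => p.1.isPrefixOf (c :: t))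
              = none := by
            rw [List.find?_append, hf]
            simp [List.find?, hp]
          rw [pvMulti, hf, pvMulti, hf2]
          simp only
          rw [pvRep]
          have hpre2 : ('\\' :: c1 :: k2).isPrefixOf (c :: pvMulti ks t) = false := by
            by_contra hcon
            have hcon' : ('\\' :: c1 :: k2).isPrefixOf (c :: pvMulti ks t) = true := by
              revert hcon; cases ('\\' :: c1 :: k2).isPrefixOf (c :: pvMulti ks t) <;> simp
            simp only [List.isPrefixOf, Bool.and_eq_true, beq_iff_eq] at hcon'
            have := pvMulti_prefix_reflect ks hrs t (c1 :: k2) hk2a hk2b hcon'.2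
            apply hp
            simp only [List.isPrefixOf, Bool.and_eq_true, beq_iff_eq]
            exact ⟨hcon'.1, this⟩
          rw [hpre2]
          simp only [Bool.false_eq_true, if_false]
          rw [ihn t hs']

-- table sanity, checked once by decide on the literal table
def pvGoodKey (k : List Char) : Bool :=
  match k with
  | a :: c :: w => (a == '\\') && (c == 'p' || c == 'P') && !((c :: w).contains '\\') && !((c :: w).contains '[')
  | _ => false

def pvGood (ks : List (List Char × List Char)) : Bool :=
  ks.all (fun p => pvGoodKey p.1 && (match p.2 with | '[' :: _ => true | _ => false)
                   && pvKfree 'p' p.2 && pvKfree 'P' p.2)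

theorem pvMulti_nil (s : List Char) : pvMulti [] s = s := by
  induction s with
  | nil => rw [pvMulti]
  | cons c t ih => rw [pvMulti]; simp [ih]

theorem pvGoodKey_shape (k : List Char) (h : pvGoodKey k = true) :
    ∃ c w, k = '\\' :: c :: w ∧ (c = 'p' ∨ c = 'P') ∧ '\\' ∉ (c :: w) ∧ '[' ∉ (c :: w) := by
  match k with
  | [] => simp [pvGoodKey] at h
  | [a] => simp [pvGoodKey] at h
  | a :: c :: w =>
    simp only [pvGoodKey, Bool.and_eq_true, beq_iff_eq, Bool.or_eq_true, Bool.not_eq_true',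
      List.contains_eq_mem, decide_eq_false_iff_not] at h
    exact ⟨c, w, by rw [h.1.1.1], h.1.1.2, h.1.2, h.2⟩

theorem pvRepHead_shape (v : List Char)
    (h : (match v with | '[' :: _ => true | _ => false) = true) : ∃ t, v = '[' :: t := by
  split at h
  · exact ⟨_, rfl⟩
  · exact absurd h (by simp)

theorem pvFold_eq (ks : List (List Char × List Char)) (h : pvGood ks = true) (s : List Char) :
    List.foldl (fun r p => pvRep p.1 p.2 r) s ks = pvMulti ks s := by
  induction ks using List.reverseRecOn with
  | nil => simp [pvMulti_nil]
  | append_singleton l p ih =>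
    have hmem := List.all_eq_true.mp h
    have hgl : pvGood l = true :=
      List.all_eq_true.mpr fun q hq => hmem q (List.mem_append_left _ hq)
    have hp := hmem p (List.mem_append_right _ List.mem_cons_self)
    simp only [Bool.and_eq_true] at hp
    obtain ⟨c, w, hk, hcase, hnb, hnl⟩ := pvGoodKey_shape p.1 hp.1.1.1
    have hks : ∀ q ∈ l, ∃ w, q.1 = '\\' :: w := by
      intro q hq
      have hq' := hmem q (List.mem_append_left _ hq)
      simp only [Bool.and_eq_true] at hq'
      obtain ⟨c', w', hk', _⟩ := pvGoodKey_shape q.1 hq'.1.1.1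
      exact ⟨c' :: w', hk'⟩
    have hrs : ∀ q ∈ l, ∃ v, q.2 = '[' :: v := by
      intro q hq
      have hq' := hmem q (List.mem_append_left _ hq)
      simp only [Bool.and_eq_true] at hq'
      exact pvRepHead_shape q.2 hq'.1.1.2
    have hfree : ∀ q ∈ l, pvKfree c q.2 = true := by
      intro q hq
      have hq' := hmem q (List.mem_append_left _ hq)
      simp only [Bool.and_eq_true] at hq'
      rcases hcase with hc | hc <;> rw [hc]
      · exact hq'.1.2
      · exact hq'.2
    rcases p with ⟨k, rep⟩
    simp only at hk
    subst hk
    rw [List.foldl_append, List.foldl_cons, List.foldl_nil, ih hgl,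
      pvRep_multi l c w rep hks hrs hfree hnb hnl s]

-- one str.replace pass equals pvRep (nonempty key)
theorem pvReplace_eq_rep (k : List Char) (hk : k ≠ []) (r s : List Char) :
    PySem.Chars.replace s k r = pvRep k r s := by
  obtain ⟨a, k', rfl⟩ : ∃ a k', k = a :: k' := by
    cases k with
    | nil => exact absurd rfl hk
    | cons a k' => exact ⟨a, k', rfl⟩
  have hgo : ∀ fuel (l acc : List Char), l.length ≤ fuel →
      PySem.Chars.replace.go (a :: k') r fuel l acc = acc.reverse ++ pvRep (a :: k') r l := by
    intro fuel
    induction fuel with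
    | zero =>
      intro l acc hl
      have : l = [] := List.eq_nil_of_length_eq_zero (Nat.le_zero.mp hl)
      subst this
      rw [PySem.Chars.replace.go, pvRep]
    | succ fuel ih =>
      intro l acc hl
      cases l with
      | nil =>
        rw [PySem.Chars.replace.go, pvRep]
        · simp
        · omega
      | cons c t =>
        rw [PySem.Chars.replace.go, pvRep]
        by_cases hpre : (a :: k').isPrefixOf (c :: t) = true
        · rw [if_pos hpre, if_pos hpre]
          rw [ih (List.drop (a :: k').length (c :: t)) (r.reverse ++ acc) (by simp at hl ⊢; omega)]
          simp [List.drop_succ_cons]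
        · rw [if_neg hpre, if_neg hpre, ih t (c :: acc) (by simpa using hl)]
          simp
  rw [PySem.Chars.replace]
  simp only [List.isEmpty_cons, Bool.false_eq_true, if_false]
  rw [hgo s.length s [] le_rfl]
  simp

-- a fold of str.replace passes, seen on the char-list side
theorem pvFold_replace_toList (L : List (String × String)) (hL : ∀ p ∈ L, p.1.toList ≠ [])
    (s : String) :
    (List.foldl (fun r p => PySem.Str.replace r p.1 p.2) s L).toList
      = List.foldl (fun r p => pvRep p.1.toList p.2.toList r) s.toList L := by
  induction L generalizing s with
  | nil => simp
  | cons p L' ih =>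
    simp only [List.foldl_cons]
    rw [ih (fun q hq => hL q (List.mem_cons_of_mem _ hq)) (PySem.Str.replace s p.1 p.2)]
    congr 1
    rw [PySem.Str.toList_replace, pvReplace_eq_rep _ (hL p List.mem_cons_self)]

-- ===== VERDICT (by name: the statement is the Claim_ definition above) =====
theorem expand_unicode_properties_py_spec : Claim_equal_expand_unicode_properties_py := by
  intro pattern _
  unfold Spec_expand_unicode_properties_py
  refine String.toList_inj.mp ?_
  have hA : (expand_unicode_properties_py pattern).toList
      = List.foldl (fun r p => pvRep p.1.toList p.2.toList r) pattern.toList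
          (pvUnicodeProps ++ pvNegatedProps) := by
    simp only [expand_unicode_properties_py]
    rw [← List.foldl_append, pvFold_replace_toList _ (by decide)]
  have hB : (expand_unicode_properties_py_alt pattern).toList
      = List.foldl (fun r p => pvRep p.1.toList p.2.toList r) pattern.toList pvTableB := by
    simp only [expand_unicode_properties_py_alt]
    rw [String.toList_ofList, pvScan_eq_multi, ← pvFold_eq pvTableC (by decide),
      show pvTableC = pvTableB.map (fun p => (p.1.toList, p.2.toList)) from rfl, List.foldl_map]
  rw [hA, hB]
  norm_num [pvUnicodeProps, pvNegatedProps, pvTableB]
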